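-- pv_equiv track=rewrite | github.com/wailsamjouni/trees | src/GraphStructure.py | path_has_failure
-- ===== SOURCE A (Python) =====
-- def path_has_failure(edge_disjoint_path, failed_edges):
--
--     # logger = self._get_logger('path_has_failure.log')
--
--     path_edges = [(edge_disjoint_path[i], edge_disjoint_path[i+1])
--                   for i in range(len(edge_disjoint_path) - 1)]
--
--     # logger.debug(f'Path converted to edges: {path_edges}')
--
--     def is_edge_failed(edge):
--         return edge in failed_edges or (edge[1], edge[0]) in failed_edges
--
--     failed_path = [
--         edge for edge in path_edges if is_edge_failed(edge)]
--     if failed_path: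
--         # logger.error(
--             # 'This edge disjoint path contains edges that has been found in failed edges: %s', failed_path)
--         return True
--     else:
--         # logger.info(
--             # 'This edge disjoint path does not suffer any failure.')
--         return False
-- ===== SOURCE B (Python) =====
-- def path_has_failure(edge_disjoint_path, failed_edges):
--     # One pass over failed_edges against a prebuilt set of the path's edges.
--     path_set = set(zip(edge_disjoint_path, edge_disjoint_path[1:]))
--     for u, v in failed_edges:
--         if (u, v) in path_set or (v, u) in path_set:
--             return True
--     return False
-- ===== Notes on version B (the rewrite author's own statement) =====
-- stated objective: faster
-- what changed: Instead of materializing the path-edge list and filtering it with a linear scan of failed_edges per edge, B builds a hash set of the path's consecutive-pair edges once and makes a single pass over failed_edges testing membership (both orientations), with early exit.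
import Mathlib
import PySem

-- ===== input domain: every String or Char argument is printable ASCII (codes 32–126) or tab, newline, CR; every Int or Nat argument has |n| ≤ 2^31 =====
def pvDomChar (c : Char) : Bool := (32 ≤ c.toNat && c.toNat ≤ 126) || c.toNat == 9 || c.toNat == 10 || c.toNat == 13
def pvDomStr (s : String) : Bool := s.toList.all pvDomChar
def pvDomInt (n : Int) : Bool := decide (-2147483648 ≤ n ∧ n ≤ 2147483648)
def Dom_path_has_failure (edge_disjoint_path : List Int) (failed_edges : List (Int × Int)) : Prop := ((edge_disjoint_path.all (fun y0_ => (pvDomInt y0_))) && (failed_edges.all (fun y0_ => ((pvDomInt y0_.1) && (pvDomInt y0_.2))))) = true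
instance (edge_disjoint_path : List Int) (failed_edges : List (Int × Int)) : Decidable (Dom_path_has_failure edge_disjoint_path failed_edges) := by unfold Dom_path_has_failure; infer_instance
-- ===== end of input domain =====

-- B builds a set of the path's consecutive-pair edges once and scans failed_edges once with early
-- exit, instead of A's filter of the path-edge list with a linear scan of failed_edges per edge.

-- ===== PORT A =====
def path_has_failure (edge_disjoint_path : List Int) (failed_edges : List (Int × Int)) : Bool :=
  let path_edges := (PySem.List.pyRange 0 ((edge_disjoint_path.length : Int) - 1) 1).map
    (fun i => (PySem.List.pyGetD edge_disjoint_path i 0, PySem.List.pyGetD edge_disjoint_path (i + 1) 0))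
  let is_edge_failed := fun (e : Int × Int) => failed_edges.contains e || failed_edges.contains (e.2, e.1)
  let failed_path := path_edges.filter is_edge_failed
  if failed_path ≠ [] then true else false

-- ===== PORT B =====
def path_has_failure_alt (edge_disjoint_path : List Int) (failed_edges : List (Int × Int)) : Bool :=
  let pathSet : PySem.Set (Int × Int) := PySem.Set.ofList (edge_disjoint_path.zip edge_disjoint_path.tail)
  failed_edges.any (fun e => PySem.Set.contains pathSet e || PySem.Set.contains pathSet (e.2, e.1))

-- ===== PRECONDITION & SPEC =====
def Spec_path_has_failure (edge_disjoint_path : List Int) (failed_edges : List (Int × Int)) (out : Bool) : Prop := out = path_has_failure_alt edge_disjoint_path failed_edges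
instance (edge_disjoint_path : List Int) (failed_edges : List (Int × Int)) (out : Bool) : Decidable (Spec_path_has_failure edge_disjoint_path failed_edges out) := by unfold Spec_path_has_failure; infer_instance

-- ===== CLAIM (what is proved, stated in full; the proofs are below) =====
def Claim_equal_path_has_failure : Prop := ∀ (edge_disjoint_path : List Int) (failed_edges : List (Int × Int)), Dom_path_has_failure edge_disjoint_path failed_edges → Spec_path_has_failure edge_disjoint_path failed_edges (path_has_failure edge_disjoint_path failed_edges)

-- ===== LEMMAS AND PROOFS =====

-- the Nat-indexed comprehension over range(len(p)-1) is zip(p, p[1:])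
theorem zip_range : ∀ p : List Int, (List.range (p.length - 1)).map (fun k => (p.getD k 0, p.getD (k+1) 0)) = p.zip p.tail
  | [] => rfl
  | [_] => rfl
  | a :: b :: r => by
    have ih := zip_range (b :: r)
    simp only [List.length_cons, Nat.add_sub_cancel, List.range_succ_eq_map, List.map_cons,
      List.map_map] at ih ⊢
    refine congrArg₂ List.cons (by simp) ?_
    rw [show List.zipWith Prod.mk (b :: r) r = (b :: r).zip (b :: r).tail from rfl, ← ih]
    apply List.map_congr_left
    intro k _
    simp

-- A's path_edges list equals zip(p, p[1:]) as built by B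
theorem pathEdges_eq_zip (p : List Int) :
    (PySem.List.pyRange 0 ((p.length : Int) - 1) 1).map
      (fun i => (PySem.List.pyGetD p i 0, PySem.List.pyGetD p (i + 1) 0))
    = p.zip p.tail := by
  cases p with
  | nil => rfl
  | cons a q =>
    have hlen : (((a :: q).length : Int) - 1) = ((q.length : Nat) : Int) := by simp
    rw [hlen, PySem.List.pyRange_zero_natCast, List.map_map]
    have h := zip_range (a :: q)
    simp only [List.length_cons, Nat.add_sub_cancel] at h
    rw [← h]
    apply List.map_congr_left
    intro k _
    simp only [Function.comp_apply, PySem.List.pyGetD_natCast]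
    have h2 : ((k : Int) + 1) = ((k + 1 : Nat) : Int) := by push_cast; ring
    rw [h2, PySem.List.pyGetD_natCast]

-- swapping which collection the existential ranges over
theorem swap_exists (Z fe : List (Int × Int)) :
    (∃ z ∈ Z, z ∈ fe ∨ (z.2, z.1) ∈ fe) ↔ (∃ e ∈ fe, e ∈ Z ∨ (e.2, e.1) ∈ Z) := by
  constructor
  · rintro ⟨x, hx, h | h⟩
    · exact ⟨x, h, Or.inl hx⟩
    · exact ⟨(x.2, x.1), h, Or.inr (by simpa using hx)⟩
  · rintro ⟨x, hx, h | h⟩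
    · exact ⟨x, h, Or.inl hx⟩
    · exact ⟨(x.2, x.1), h, Or.inr (by simpa using hx)⟩

-- ===== VERDICT (by name: the statement is the Claim_ definition above) =====
theorem path_has_failure_spec : Claim_equal_path_has_failure := by
  intro p fe _
  unfold Spec_path_has_failure path_has_failure path_has_failure_alt
  rw [pathEdges_eq_zip, Bool.eq_iff_iff]
  simp only [ne_eq, ite_not, Bool.if_false_left, Bool.and_eq_true, Bool.not_eq_true',
    decide_eq_false_iff_not, and_true, List.any_eq_true, Bool.or_eq_true, PySem.Set.contains,
    List.contains_eq_mem, decide_eq_true_eq, PySem.Set.mem_ofList]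
  constructor
  · intro h
    obtain ⟨z, hz⟩ := List.exists_mem_of_ne_nil _ h
    have hz' := List.mem_filter.mp hz
    simp only [Bool.or_eq_true, decide_eq_true_eq] at hz'
    exact (swap_exists _ fe).mp ⟨z, hz'.1, hz'.2⟩
  · intro h
    obtain ⟨z, hzZ, hzf⟩ := (swap_exists (p.zip p.tail) fe).mpr h
    exact List.ne_nil_of_mem (List.mem_filter.mpr ⟨hzZ, by
      simp only [Bool.or_eq_true, decide_eq_true_eq]; exact hzf⟩)
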